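-- pv_equiv track=rewrite | github.com/cirosantilli/project-euler-solvers | solvers/586.py | multipliers_prefix
-- ===== SOURCE A (Python) =====
-- import math
--
-- def sieve_primes_upto(n: int) -> list[int]:
--     """Simple sieve of Eratosthenes up to n (inclusive)."""
--     if n < 2:
--         return []
--     sieve = bytearray(b"\x01") * (n + 1)
--     sieve[0:2] = b"\x00\x00"
--     lim = int(math.isqrt(n))
--     for p in range(2, lim + 1):
--         if sieve[p]:
--             start = p * p
--             step = p
--             sieve[start : n + 1 : step] = b"\x00" * (((n - start) // step) + 1)
--     return [i for i in range(n + 1) if sieve[i]]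
--
-- def multipliers_prefix(qmax: int) -> list[int]:
--     """
--     Build W[0..qmax] where W[x] is the count of multipliers <= x of form:
--         5^a * s^2
--     where s only uses primes p ≡ 2,3 (mod 5) (inert primes), any exponents.
--     """
--     if qmax <= 0:
--         return [0]
--
--     inert_primes = [
--         p for p in sieve_primes_upto(int(math.isqrt(qmax)) + 1) if p % 5 in (2, 3)
--     ]
--
--     vals: list[int] = []
--
--     def rec(idx: int, cur: int) -> None:
--         # multiply by 5^a
--         t = cur
--         while t <= qmax:
--             vals.append(t)
--             t *= 5
--
--         # multiply by inert prime squares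
--         for j in range(idx, len(inert_primes)):
--             p = inert_primes[j]
--             p2 = p * p
--             if cur * p2 > qmax:
--                 break
--             x = cur * p2
--             while x <= qmax:
--                 rec(j + 1, x)
--                 x *= p2
--
--     rec(0, 1)
--     vals = sorted(set(vals))
--
--     W = [0] * (qmax + 1)
--     c = 0
--     i = 0
--     for x in range(1, qmax + 1):
--         while i < len(vals) and vals[i] == x:
--             c += 1
--             i += 1
--         W[x] = c
--     return W
-- ===== SOURCE B (Python) =====
-- import math
--
-- def sieve_primes_upto(n: int) -> list[int]:
--     """Simple sieve of Eratosthenes up to n (inclusive)."""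
--     if n < 2:
--         return []
--     sieve = bytearray(b"\x01") * (n + 1)
--     sieve[0:2] = b"\x00\x00"
--     lim = int(math.isqrt(n))
--     for p in range(2, lim + 1):
--         if sieve[p]:
--             start = p * p
--             step = p
--             sieve[start : n + 1 : step] = b"\x00" * (((n - start) // step) + 1)
--     return [i for i in range(n + 1) if sieve[i]]
--
-- def multipliers_prefix(qmax: int) -> list[int]:
--     if qmax <= 0:
--         return [0]
--
--     inert_primes = [
--         p for p in sieve_primes_upto(int(math.isqrt(qmax)) + 1) if p % 5 in (2, 3)
--     ]
--
--     # iterative worklist: all square bases s^2 <= qmax with s built from inert primes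
--     bases = [1]
--     for p in inert_primes:
--         p2 = p * p
--         more = []
--         for b in bases:
--             x = b * p2
--             while x <= qmax:
--                 more.append(x)
--                 x *= p2
--         bases.extend(more)
--
--     # scatter base * 5^a into a 0/1 frequency array (values are pairwise distinct,
--     # so marking with 1 is an exact dedup)
--     freq = [0] * (qmax + 1)
--     for b in bases:
--         v = b
--         while v <= qmax:
--             freq[v] = 1
--             v *= 5
--
--     # running cumulative sum instead of sorting + two-pointer merge
--     W = [0] * (qmax + 1)
--     c = 0
--     for x in range(1, qmax + 1):
--         c += freq[x]
--         W[x] = c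
--     return W
-- ===== Notes on version B (the rewrite author's own statement) =====
-- stated objective: alternative
-- what changed: Replaces A's recursive backtracking generator (rec over prime indices with sorted(set(...)) and a two-pointer merge building W) by an iterative worklist that extends a list of inert-square bases one prime at a time, marks each base*5^a in a 0/1 frequency array (implicit dedup), and builds W as a running cumulative sum.
import Mathlib
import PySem

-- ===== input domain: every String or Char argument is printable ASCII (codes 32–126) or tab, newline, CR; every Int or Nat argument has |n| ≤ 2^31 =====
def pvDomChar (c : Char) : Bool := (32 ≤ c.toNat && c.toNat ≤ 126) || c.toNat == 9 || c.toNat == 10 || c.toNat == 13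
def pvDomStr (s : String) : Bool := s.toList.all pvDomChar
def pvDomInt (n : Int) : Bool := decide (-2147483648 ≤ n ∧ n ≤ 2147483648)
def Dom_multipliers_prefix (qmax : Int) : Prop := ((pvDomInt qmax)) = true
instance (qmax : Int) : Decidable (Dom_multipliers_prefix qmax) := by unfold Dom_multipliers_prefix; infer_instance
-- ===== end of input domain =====

-- B replaces A's recursive generator + sorted(set)/two-pointer merge by an iterative
-- worklist of square bases, a 0/1 frequency array and a running cumulative sum
-- (objective: alternative algorithm, same cost).

-- ===== PORT A =====
-- shared helper sieve_primes_upto (both Pythons use the identical helper).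
-- All arithmetic on values is on nonnegative ints, so it is carried out in Nat.
-- Python's slice assignment sieve[start:n+1:step] = zeros marks indices
-- start, start+step, … ≤ n; ported as the equivalent index recursion (exact).
def markSieve (n step : Nat) (l : List Bool) (i : Nat) : List Bool :=
  if 0 < step ∧ i ≤ n then markSieve n step (l.set i false) (i + step) else l
termination_by n + 1 - i
decreasing_by omega

def sievePrimesUpto (n : Nat) : List Nat :=
  if n < 2 then []
  else
    let init := ((List.replicate (n + 1) true).set 0 false).set 1 false
    let lim := Nat.sqrt n
    let s := (List.range' 2 (lim - 1)).foldl
      (fun sv p => if sv.getD p false then markSieve n p sv (p * p) else sv) init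
    (List.range (n + 1)).filter (fun i => s.getD i false)

-- A's inner `while t <= qmax: vals.append(t); t *= 5`
-- (the `0 < c` parts of this and the following guards are totality guards only:
-- every reachable call has c ≥ 1, p ≥ 2)
def pow5 (q c : Nat) : List Nat :=
  if 0 < c ∧ c ≤ q then c :: pow5 q (5 * c) else []
termination_by q + 1 - c
decreasing_by omega

-- A's `while x <= qmax: rec(j+1, x); x *= p2`, with f = the body rec(j+1, ·)
def innerA (q p : Nat) (f : Nat → List Nat) (x : Nat) : List Nat :=
  if 2 ≤ p ∧ 0 < x ∧ x ≤ q then f x ++ innerA q p f (x * (p * p)) else []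
termination_by q + 1 - x
decreasing_by
  rename_i h
  have h4 : 4 ≤ p * p := le_trans (by norm_num) (Nat.mul_le_mul h.1 h.1)
  have h5 : x * 4 ≤ x * (p * p) := Nat.mul_le_mul_left x h4
  omega

-- A's `for j in range(idx, len(inert_primes)): …` as structural recursion on the
-- suffix of the prime list; rec(j+1, x) is pow5 q x ++ forA q rest x.
def forA (q : Nat) : List Nat → Nat → List Nat
  | [], _ => []
  | p :: rest, c =>
    if c * (p * p) > q then []
    else innerA q p (fun x => pow5 q x ++ forA q rest x) (c * (p * p)) ++ forA q rest c

-- A's `while i < len(vals) and vals[i] == x: c += 1; i += 1`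
def consumeA (L : List Nat) (x c i : Nat) : Nat × Nat :=
  if h : L[i]? = some x then consumeA L x (c + 1) (i + 1) else (c, i)
termination_by L.length - i
decreasing_by
  have : i < L.length := (List.getElem?_eq_some_iff.mp h).1
  omega

-- A's `for x in range(1, qmax+1): …; W[x] = c` (assignments are made in index
-- order into the zero-initialised W, so they build the tail of W in order)
def wloopA (L : List Nat) (q x c i : Nat) : List Nat :=
  if x ≤ q then
    let r := consumeA L x c i
    r.1 :: wloopA L q (x + 1) r.1 r.2
  else []
termination_by q + 1 - x
decreasing_by omega

def multipliers_prefix (qmax : Int) : List Int :=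
  if qmax ≤ 0 then [0]
  else
    let q := qmax.toNat
    let primes := (sievePrimesUpto (Nat.sqrt q + 1)).filter
      (fun p => p % 5 == 2 || p % 5 == 3)
    let vals := pow5 q 1 ++ forA q primes 1
    let L := PySem.List.sorted (PySem.Set.ofList vals) (fun x => x) false
    (0 :: wloopA L q 1 0 0).map (fun n => (n : Int))

-- ===== PORT B =====
-- B's `x = b*p2; while x <= qmax: more.append(x); x *= p2`
def growB (q p x : Nat) : List Nat :=
  if 2 ≤ p ∧ 0 < x ∧ x ≤ q then x :: growB q p (x * (p * p)) else []
termination_by q + 1 - x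
decreasing_by
  rename_i h
  have h4 : 4 ≤ p * p := le_trans (by norm_num) (Nat.mul_le_mul h.1 h.1)
  have h5 : x * 4 ≤ x * (p * p) := Nat.mul_le_mul_left x h4
  omega

-- B's worklist: `bases = [1]; for p in inert_primes: …; bases.extend(more)`
def basesB (q : Nat) (ps : List Nat) : List Nat :=
  ps.foldl (fun bs p => bs ++ bs.flatMap (fun b => growB q p (b * (p * p)))) [1]

-- B's `v = b; while v <= qmax: freq[v] = 1; v *= 5`
def markB (q : Nat) (freq : List Nat) (v : Nat) : List Nat :=
  if 0 < v ∧ v ≤ q then markB q (freq.set v 1) (5 * v) else freq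
termination_by q + 1 - v
decreasing_by omega

-- B's `for x in range(1, qmax+1): c += freq[x]; W[x] = c`
def cumB (freq : List Nat) (q x c : Nat) : List Nat :=
  if x ≤ q then
    let c' := c + freq.getD x 0
    c' :: cumB freq q (x + 1) c'
  else []
termination_by q + 1 - x
decreasing_by omega

def multipliers_prefix_alt (qmax : Int) : List Int :=
  if qmax ≤ 0 then [0]
  else
    let q := qmax.toNat
    let primes := (sievePrimesUpto (Nat.sqrt q + 1)).filter
      (fun p => p % 5 == 2 || p % 5 == 3)
    let bases := basesB q primes
    let freq := bases.foldl (markB q) (List.replicate (q + 1) 0)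
    (0 :: cumB freq q 1 0).map (fun n => (n : Int))

-- ===== PRECONDITION & SPEC =====
def Spec_multipliers_prefix (qmax : Int) (out : List Int) : Prop := out = multipliers_prefix_alt qmax
instance (qmax : Int) (out : List Int) : Decidable (Spec_multipliers_prefix qmax out) := by unfold Spec_multipliers_prefix; infer_instance

-- ===== CLAIM (what is proved, stated in full; the proofs are below) =====
def Claim_equal_multipliers_prefix : Prop := ∀ (qmax : Int), Dom_multipliers_prefix qmax → Spec_multipliers_prefix qmax (multipliers_prefix qmax)

-- ===== LEMMAS AND PROOFS =====

-- value spec: n is generated from c using 5-powers and squares of primes of ps, n ≤ q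
def P5 (q c n : Nat) : Prop := ∃ a, n = c * 5 ^ a ∧ n ≤ q

def VS (q : Nat) : List Nat → Nat → Nat → Prop
  | [], c, n => P5 q c n
  | p :: rest, c, n => ∃ k, VS q rest (c * (p * p) ^ k) n

-- base spec for B's worklist, tracking the intermediate ≤ q bounds
def MS (q : Nat) : List Nat → Nat → Nat → Prop
  | [], b0, b => b = b0
  | p :: rest, b0, b => ∃ k, b0 * (p * p) ^ k ≤ q ∧ MS q rest (b0 * (p * p) ^ k) b

theorem pow5_mem (q n : Nat) (c : Nat) (hc : 0 < c) : n ∈ pow5 q c ↔ P5 q c n := by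
  fun_induction pow5 q c with
  | case1 c h ih =>
    rw [List.mem_cons, ih (by omega)]
    constructor
    · rintro (rfl | ⟨a, rfl, ha⟩)
      · exact ⟨0, by simp, h.2⟩
      · exact ⟨a + 1, by ring, ha⟩
    · rintro ⟨a, rfl, ha⟩
      cases a with
      | zero => left; simp
      | succ a => right; exact ⟨a, by ring, ha⟩
  | case2 c h =>
    simp only [List.not_mem_nil, false_iff]
    rintro ⟨a, rfl, ha⟩
    have h1 : 1 ≤ 5 ^ a := Nat.one_le_pow a 5 (by norm_num)
    have h2 : c * 1 ≤ c * 5 ^ a := Nat.mul_le_mul_left c h1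
    omega

theorem VS_facts (q : Nat) (ps : List Nat) (c n : Nat) (hp : ∀ p ∈ ps, 1 ≤ p)
    (hc : 0 < c) (h : VS q ps c n) : c ∣ n ∧ 0 < n ∧ n ≤ q := by
  induction ps generalizing c with
  | nil =>
    obtain ⟨a, rfl, ha⟩ := h
    refine ⟨dvd_mul_right _ _, ?_, ha⟩
    have h1 : 1 ≤ 5 ^ a := Nat.one_le_pow a 5 (by norm_num)
    exact Nat.mul_pos hc (by omega)
  | cons p rest ih =>
    obtain ⟨k, hv⟩ := h
    have hp1 : 1 ≤ p := hp p (List.mem_cons_self ..)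
    have hpos : 0 < c * (p * p) ^ k :=
      Nat.mul_pos hc (pow_pos (Nat.mul_pos hp1 hp1) k)
    obtain ⟨hd, hn, hq⟩ := ih _ (fun r hr => hp r (List.mem_cons_of_mem _ hr)) hpos hv
    exact ⟨dvd_trans (dvd_mul_right _ _) hd, hn, hq⟩

theorem innerA_mem (q p x n : Nat) (F : Nat → List Nat) (hp : 2 ≤ p) (hx : 0 < x) :
    n ∈ innerA q p F x ↔ ∃ j, x * (p * p) ^ j ≤ q ∧ n ∈ F (x * (p * p) ^ j) := by
  have hpp : 0 < p * p := Nat.mul_pos (by omega) (by omega)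
  revert hx
  fun_induction innerA q p F x with
  | case1 x h ih =>
    intro hx
    simp only [List.mem_append, ih (Nat.mul_pos hx hpp)]
    have hass : ∀ j, x * (p * p) * (p * p) ^ j = x * (p * p) ^ (j + 1) := fun j => by ring
    constructor
    · rintro (hF | ⟨j, hj, hFj⟩)
      · exact ⟨0, by simpa using h.2.2, by simpa using hF⟩
      · refine ⟨j + 1, ?_, ?_⟩
        · rw [← hass]; exact hj
        · rw [← hass]; exact hFj
    · rintro ⟨j, hj, hFj⟩
      cases j with
      | zero => left; simpa using hFj
      | succ j =>
        right
        refine ⟨j, ?_, ?_⟩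
        · rw [hass]; exact hj
        · rw [hass]; exact hFj
  | case2 x h =>
    intro hx
    simp only [List.not_mem_nil, false_iff]
    rintro ⟨j, hj, _⟩
    have hqx : q < x := by
      rcases Nat.lt_or_ge q x with h' | h'
      · exact h'
      · exact absurd ⟨hp, hx, h'⟩ h
    have h1 : 1 ≤ (p * p) ^ j := Nat.one_le_pow _ _ hpp
    have h2 : x * 1 ≤ x * (p * p) ^ j := Nat.mul_le_mul_left x h1
    omega

theorem VS_break (q : Nat) (ps : List Nat) (p c n : Nat) (hq : q < c * (p * p))
    (hc : 0 < c) (hps : ∀ r ∈ ps, p ≤ r ∧ 2 ≤ r) :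
    VS q ps c n ↔ P5 q c n := by
  induction ps with
  | nil => exact Iff.rfl
  | cons r rest ih =>
    have hr := hps r (List.mem_cons_self ..)
    constructor
    · rintro ⟨k, hv⟩
      cases k with
      | zero =>
        rw [pow_zero, mul_one] at hv
        exact (ih (fun s hs => hps s (List.mem_cons_of_mem _ hs))).mp hv
      | succ k =>
        exfalso
        have hrr : 0 < r * r := Nat.mul_pos (by omega) (by omega)
        have hpos : 0 < c * (r * r) ^ (k + 1) := Nat.mul_pos hc (pow_pos hrr _)
        obtain ⟨hd, hn, hle⟩ := VS_facts q rest _ n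
          (fun s hs => by have := hps s (List.mem_cons_of_mem _ hs); omega) hpos hv
        have hbig : c * (p * p) ≤ c * (r * r) ^ (k + 1) := by
          have h1 : p * p ≤ r * r := Nat.mul_le_mul hr.1 hr.1
          have h2 : r * r ≤ (r * r) ^ (k + 1) := by
            calc r * r = (r * r) ^ 1 := (pow_one _).symm
            _ ≤ (r * r) ^ (k + 1) := Nat.pow_le_pow_right (by omega) (by omega)
          exact Nat.mul_le_mul_left c (le_trans h1 h2)
        have hled : c * (r * r) ^ (k + 1) ≤ n := Nat.le_of_dvd hn hd
        omega
    · intro hP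
      refine ⟨0, ?_⟩
      rw [pow_zero, mul_one]
      exact (ih (fun s hs => hps s (List.mem_cons_of_mem _ hs))).mpr hP

theorem valsA_mem (q : Nat) (ps : List Nat) : ∀ (c n : Nat), 0 < c →
    (∀ p ∈ ps, 2 ≤ p) → ps.Pairwise (· ≤ ·) →
    (n ∈ pow5 q c ++ forA q ps c ↔ VS q ps c n) := by
  induction ps with
  | nil =>
    intro c n hc _ _
    simp only [forA, List.append_nil]
    exact pow5_mem q n c hc
  | cons p rest ih =>
    intro c n hc h2 hs
    have hp : 2 ≤ p := h2 p (List.mem_cons_self ..)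
    have h2' : ∀ r ∈ rest, 2 ≤ r := fun r hr => h2 r (List.mem_cons_of_mem _ hr)
    have hs' : rest.Pairwise (· ≤ ·) := (List.pairwise_cons.mp hs).2
    have hple : ∀ r ∈ rest, p ≤ r := (List.pairwise_cons.mp hs).1
    have hpp : 0 < p * p := Nat.mul_pos (by omega) (by omega)
    simp only [forA]
    by_cases hbr : c * (p * p) > q
    · rw [if_pos hbr, List.append_nil, pow5_mem q n c hc]
      refine (VS_break q (p :: rest) p c n hbr hc ?_).symm
      intro r hr
      rcases List.mem_cons.mp hr with rfl | hr'
      · exact ⟨le_refl _, hp⟩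
      · exact ⟨hple r hr', h2' r hr'⟩
    · rw [if_neg hbr]
      push Not at hbr
      have hcp : 0 < c * (p * p) := Nat.mul_pos hc hpp
      have hin := innerA_mem q p (c * (p * p)) n (fun x => pow5 q x ++ forA q rest x) hp hcp
      have ihc := ih c n hc h2' hs'
      have hass : ∀ j, c * (p * p) * (p * p) ^ j = c * (p * p) ^ (j + 1) := fun j => by ring
      simp only [List.mem_append] at ihc ⊢
      constructor
      -- forward
      · rintro (h5 | hInn | hFor)
        · exact ⟨0, by simpa [pow_zero] using ihc.mp (Or.inl h5)⟩
        · obtain ⟨j, hj, hF⟩ := hin.mp hInn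
          have hpos : 0 < c * (p * p) * (p * p) ^ j := Nat.mul_pos hcp (pow_pos hpp j)
          have := (ih (c * (p * p) * (p * p) ^ j) n hpos h2' hs').mp (by simpa using hF)
          refine ⟨j + 1, ?_⟩
          rw [← hass]
          exact this
        · exact ⟨0, by simpa [pow_zero] using ihc.mp (Or.inr hFor)⟩
      -- backward
      · rintro ⟨k, hv⟩
        cases k with
        | zero =>
          rw [pow_zero, mul_one] at hv
          rcases ihc.mpr hv with h5 | hFor
          · exact Or.inl h5
          · exact Or.inr (Or.inr hFor)
        | succ j =>
          refine Or.inr (Or.inl ?_)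
          have hpos : 0 < c * (p * p) ^ (j + 1) := Nat.mul_pos hc (pow_pos hpp _)
          obtain ⟨hd, hn, hle⟩ := VS_facts q rest _ n (fun r hr => by have := h2' r hr; omega) hpos hv
          have hbd : c * (p * p) * (p * p) ^ j ≤ q := by
            rw [hass]
            exact le_trans (Nat.le_of_dvd hn hd) hle
          refine hin.mpr ⟨j, hbd, ?_⟩
          have := (ih (c * (p * p) * (p * p) ^ j) n (by rw [hass]; exact hpos) h2' hs').mpr
            (by rw [hass]; exact hv)
          simpa using this

theorem growB_mem (q p x y : Nat) (hp : 2 ≤ p) (hx : 0 < x) :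
    y ∈ growB q p x ↔ ∃ j, y = x * (p * p) ^ j ∧ y ≤ q := by
  fun_induction growB q p x with
  | case1 x h ih =>
    have hx' : 0 < x * (p * p) := Nat.mul_pos h.2.1 (Nat.mul_pos (by omega) (by omega))
    rw [List.mem_cons, ih hx']
    constructor
    · rintro (rfl | ⟨j, rfl, hj⟩)
      · exact ⟨0, by simp, h.2.2⟩
      · exact ⟨j + 1, by ring, hj⟩
    · rintro ⟨j, rfl, hj⟩
      cases j with
      | zero => left; simp
      | succ j => right; exact ⟨j, by ring, hj⟩
  | case2 x h =>
    simp only [List.not_mem_nil, false_iff]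
    rintro ⟨j, rfl, hj⟩
    have h1 : 1 ≤ (p * p) ^ j := Nat.one_le_pow _ _ (Nat.mul_pos (by omega) (by omega))
    have h2 : x * 1 ≤ x * (p * p) ^ j := Nat.mul_le_mul_left x h1
    omega

theorem basesB_mem (q : Nat) (ps : List Nat) : ∀ (bs : List Nat) (b : Nat),
    (∀ p ∈ ps, 2 ≤ p) → (∀ x ∈ bs, 0 < x ∧ x ≤ q) →
    (b ∈ ps.foldl (fun bs p => bs ++ bs.flatMap (fun b => growB q p (b * (p * p)))) bs ↔
      ∃ b0 ∈ bs, MS q ps b0 b) := by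
  induction ps with
  | nil =>
    intro bs b _ _
    simp [MS]
  | cons p rest ih =>
    intro bs b h2 hbs
    have hp : 2 ≤ p := h2 p (List.mem_cons_self ..)
    have hpp : 0 < p * p := Nat.mul_pos (by omega) (by omega)
    have h2' : ∀ r ∈ rest, 2 ≤ r := fun r hr => h2 r (List.mem_cons_of_mem _ hr)
    rw [List.foldl_cons]
    have hbs' : ∀ x ∈ bs ++ bs.flatMap (fun b => growB q p (b * (p * p))), 0 < x ∧ x ≤ q := by
      intro x hx
      rcases List.mem_append.mp hx with hx | hx
      · exact hbs x hx
      · obtain ⟨b1, hb1, hg⟩ := List.mem_flatMap.mp hx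
        obtain ⟨j, rfl, hle⟩ := (growB_mem q p (b1 * (p * p)) x hp
          (Nat.mul_pos (hbs b1 hb1).1 hpp)).mp hg
        exact ⟨Nat.mul_pos (Nat.mul_pos (hbs b1 hb1).1 hpp) (pow_pos hpp j), hle⟩
    rw [ih _ b h2' hbs']
    constructor
    · rintro ⟨b0, hb0, hms⟩
      rcases List.mem_append.mp hb0 with hb0 | hb0
      · refine ⟨b0, hb0, 0, ?_, ?_⟩
        · rw [pow_zero, mul_one]; exact (hbs b0 hb0).2
        · rw [pow_zero, mul_one]; exact hms
      · obtain ⟨b1, hb1, hg⟩ := List.mem_flatMap.mp hb0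
        obtain ⟨j, rfl, hle⟩ := (growB_mem q p (b1 * (p * p)) b0 hp
          (Nat.mul_pos (hbs b1 hb1).1 hpp)).mp hg
        refine ⟨b1, hb1, j + 1, ?_, ?_⟩
        · have he : b1 * (p * p) * (p * p) ^ j = b1 * (p * p) ^ (j + 1) := by ring
          rw [← he]
          exact hle
        · have he : b1 * (p * p) * (p * p) ^ j = b1 * (p * p) ^ (j + 1) := by ring
          rw [← he]
          exact hms
    · rintro ⟨b1, hb1, k, hk, hms⟩
      cases k with
      | zero =>
        rw [pow_zero, mul_one] at hms
        exact ⟨b1, List.mem_append.mpr (Or.inl hb1), hms⟩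
      | succ j =>
        refine ⟨b1 * (p * p) ^ (j + 1), List.mem_append.mpr (Or.inr ?_), hms⟩
        refine List.mem_flatMap.mpr ⟨b1, hb1, ?_⟩
        refine (growB_mem q p (b1 * (p * p)) _ hp (Nat.mul_pos (hbs b1 hb1).1 hpp)).mpr ⟨j, by ring, hk⟩

theorem MS_P5_iff_VS (q : Nat) (ps : List Nat) (c y : Nat) (hc : 0 < c)
    (hp : ∀ p ∈ ps, 1 ≤ p) :
    (∃ b, MS q ps c b ∧ P5 q b y) ↔ VS q ps c y := by
  induction ps generalizing c with
  | nil =>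
    constructor
    · rintro ⟨b, rfl, hP⟩; exact hP
    · intro h; exact ⟨c, rfl, h⟩
  | cons p rest ih =>
    have hp1 : 1 ≤ p := hp p (List.mem_cons_self ..)
    have hp' : ∀ r ∈ rest, 1 ≤ r := fun r hr => hp r (List.mem_cons_of_mem _ hr)
    have hpp : 0 < p * p := Nat.mul_pos (by omega) (by omega)
    constructor
    · rintro ⟨b, ⟨k, _, hms⟩, hP⟩
      exact ⟨k, (ih _ (Nat.mul_pos hc (pow_pos hpp k)) hp').mp ⟨b, hms, hP⟩⟩
    · rintro ⟨k, hv⟩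
      have hpos : 0 < c * (p * p) ^ k := Nat.mul_pos hc (pow_pos hpp k)
      obtain ⟨hd, hn, hle⟩ := VS_facts q rest _ y hp' hpos hv
      obtain ⟨b, hms, hP⟩ := (ih _ hpos hp').mpr hv
      exact ⟨b, ⟨k, le_trans (Nat.le_of_dvd hn hd) hle, hms⟩, hP⟩

theorem markB_length (q : Nat) (freq : List Nat) (v : Nat) :
    (markB q freq v).length = freq.length := by
  fun_induction markB q freq v with
  | case1 freq v h ih => rw [ih, List.length_set]
  | case2 freq v h => rfl

theorem markB_getD (q : Nat) (freq : List Nat) (v y : Nat) (hv : 0 < v)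
    (hlen : freq.length = q + 1) :
    (markB q freq v).getD y 0 = 1 ↔ P5 q v y ∨ freq.getD y 0 = 1 := by
  revert hv hlen
  fun_induction markB q freq v with
  | case1 freq v h ih =>
    intro hv hlen
    have hlen' : (freq.set v 1).length = q + 1 := by rw [List.length_set]; exact hlen
    rw [ih (by omega) hlen']
    have hset : ∀ z, (freq.set v 1).getD z 0 = 1 ↔ z = v ∨ freq.getD z 0 = 1 := by
      intro z
      by_cases hz : z = v
      · subst hz
        simp [List.getD_eq_getElem?_getD, List.getElem?_set_self (by omega : z < freq.length)]
      · simp [List.getD_eq_getElem?_getD, List.getElem?_set_ne (Ne.symm hz), hz]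
    rw [hset y]
    have hP : P5 q v y ↔ y = v ∨ P5 q (5 * v) y := by
      constructor
      · rintro ⟨a, rfl, ha⟩
        cases a with
        | zero => left; simp
        | succ a => right; exact ⟨a, by ring, ha⟩
      · rintro (rfl | ⟨a, rfl, ha⟩)
        · exact ⟨0, by simp, h.2⟩
        · exact ⟨a + 1, by ring, ha⟩
    rw [hP]
    tauto
  | case2 freq v h =>
    intro hv hlen
    have hqv : q < v := by
      rcases Nat.lt_or_ge q v with h' | h'
      · exact h'
      · exact absurd ⟨hv, h'⟩ h
    have : ¬ P5 q v y := by
      rintro ⟨a, rfl, ha⟩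
      have h1 : 1 ≤ 5 ^ a := Nat.one_le_pow _ _ (by norm_num)
      have h2 : v * 1 ≤ v * 5 ^ a := Nat.mul_le_mul_left v h1
      omega
    tauto

theorem markB_01 (q : Nat) (freq : List Nat) (v y : Nat)
    (h : freq.getD y 0 = 0 ∨ freq.getD y 0 = 1) :
    (markB q freq v).getD y 0 = 0 ∨ (markB q freq v).getD y 0 = 1 := by
  revert h
  fun_induction markB q freq v with
  | case1 freq v hg ih =>
    intro h
    apply ih
    by_cases hz : y = v
    · subst hz
      by_cases hlt : y < freq.length
      · simp [List.getD_eq_getElem?_getD, List.getElem?_set_self hlt]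
      · rw [List.set_eq_of_length_le (by omega)]
        exact h
    · rw [List.getD_eq_getElem?_getD, List.getElem?_set_ne (Ne.symm hz), ← List.getD_eq_getElem?_getD]
      exact h
  | case2 freq v hg =>
    intro h
    exact h

theorem foldMark_getD (q : Nat) (bs : List Nat) (freq : List Nat) (y : Nat)
    (hb : ∀ b ∈ bs, 0 < b) (hlen : freq.length = q + 1) :
    (bs.foldl (markB q) freq).getD y 0 = 1 ↔
      (∃ b ∈ bs, P5 q b y) ∨ freq.getD y 0 = 1 := by
  induction bs generalizing freq with
  | nil => simp
  | cons b rest ih =>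
    rw [List.foldl_cons]
    rw [ih _ (fun r hr => hb r (List.mem_cons_of_mem _ hr))
      (by rw [markB_length]; exact hlen)]
    rw [markB_getD q freq b y (hb b (List.mem_cons_self ..)) hlen]
    constructor
    · rintro (h1 | (h2 | h3))
      · exact Or.inl ⟨_, List.mem_cons_of_mem _ h1.choose_spec.1, h1.choose_spec.2⟩
      · exact Or.inl ⟨b, List.mem_cons_self .., h2⟩
      · exact Or.inr h3
    · rintro (⟨b1, hb1, hP⟩ | h3)
      · rcases List.mem_cons.mp hb1 with rfl | hb1'
        · exact Or.inr (Or.inl hP)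
        · exact Or.inl ⟨b1, hb1', hP⟩
      · exact Or.inr (Or.inr h3)

theorem foldMark_01 (q : Nat) (bs : List Nat) (freq : List Nat) (y : Nat)
    (h : freq.getD y 0 = 0 ∨ freq.getD y 0 = 1) :
    (bs.foldl (markB q) freq).getD y 0 = 0 ∨ (bs.foldl (markB q) freq).getD y 0 = 1 := by
  induction bs generalizing freq with
  | nil => exact h
  | cons b rest ih =>
    rw [List.foldl_cons]
    exact ih _ (markB_01 q freq b y h)

theorem consumeA_stop (L : List Nat) (x c i : Nat) (h : ¬ L[i]? = some x) :
    consumeA L x c i = (c, i) := by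
  rw [consumeA, dif_neg h]

theorem walk (q : Nat) (L freq : List Nat) (hL : L.Pairwise (· < ·))
    (hmem : ∀ y, freq.getD y 0 = if y ∈ L then 1 else 0) :
    ∀ x n, 0 < x → (∀ j (h : j < L.length), L[j] < x ↔ j < n) →
      wloopA L q x n n = cumB freq q x n := by
  have hmono := List.pairwise_iff_getElem.mp hL
  have main : ∀ m x n, q + 1 - x = m → 0 < x →
      (∀ j (h : j < L.length), L[j] < x ↔ j < n) →
      wloopA L q x n n = cumB freq q x n := by
    intro m
    induction m with
    | zero =>
      intro x n hm hx hinv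
      rw [wloopA, cumB, if_neg (by omega), if_neg (by omega)]
    | succ m ihm =>
      intro x n hm hx hinv
      rw [wloopA, cumB]
      by_cases hxq : x ≤ q
      · rw [if_pos hxq, if_pos hxq]
        by_cases hmemx : x ∈ L
        · obtain ⟨j, hj, hxj⟩ := List.mem_iff_getElem.mp hmemx
          have hjn : ¬ j < n := fun h' => by have := (hinv j hj).mpr h'; omega
          have hnj : n ≤ j := Nat.le_of_not_lt hjn
          have hnlen : n < L.length := lt_of_le_of_lt hnj hj
          have hLn_lt : ¬ L[n] < x := by rw [hinv n hnlen]; omega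
          have hLn : L[n] = x := by
            rcases eq_or_lt_of_le hnj with rfl | hlt
            · exact hxj
            · exact absurd (hxj ▸ hmono n j hnlen hj hlt) hLn_lt
          have hstep1 : L[n]? = some x := by
            rw [List.getElem?_eq_getElem hnlen, hLn]
          have hstop : ¬ (L[n + 1]? = some x) := by
            intro hsome
            obtain ⟨hlt, heq⟩ := List.getElem?_eq_some_iff.mp hsome
            have := hmono n (n + 1) hnlen hlt (by omega)
            rw [hLn, heq] at this
            omega
          have hcons : consumeA L x n n = (n + 1, n + 1) := by
            rw [consumeA, dif_pos hstep1, consumeA_stop _ _ _ _ hstop]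
          have hfreqx : freq.getD x 0 = 1 := by rw [hmem x, if_pos hmemx]
          rw [hcons, hfreqx]
          show (n + 1) :: wloopA L q (x + 1) (n + 1) (n + 1) =
            (n + 1) :: cumB freq q (x + 1) (n + 1)
          congr 1
          apply ihm (x + 1) (n + 1) (by omega) (by omega)
          intro j' hj'
          constructor
          · intro hlt
            by_contra h'
            have hge : n < j' := by omega
            have := hmono n j' hnlen hj' hge
            rw [hLn] at this
            omega
          · intro hlt'
            rcases Nat.lt_or_ge j' n with h' | h'
            · have := (hinv j' hj').mpr h'; omega
            · have : j' = n := by omega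
              subst this
              rw [hLn]
              omega
        · have hstop0 : ¬ (L[n]? = some x) := by
            intro hsome
            obtain ⟨hlt, heq⟩ := List.getElem?_eq_some_iff.mp hsome
            exact hmemx (heq ▸ List.getElem_mem hlt)
          have hcons : consumeA L x n n = (n, n) := consumeA_stop _ _ _ _ hstop0
          have hfreqx : freq.getD x 0 = 0 := by rw [hmem x, if_neg hmemx]
          rw [hcons, hfreqx]
          show n :: wloopA L q (x + 1) n n = (n + 0) :: cumB freq q (x + 1) (n + 0)
          rw [Nat.add_zero]
          congr 1
          apply ihm (x + 1) n (by omega) (by omega)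
          intro j' hj'
          constructor
          · intro hlt
            have hne : L[j'] ≠ x := fun he => hmemx (he ▸ List.getElem_mem hj')
            have : L[j'] < x := by omega
            exact (hinv j' hj').mp this
          · intro hlt'
            have := (hinv j' hj').mpr hlt'
            omega
      · rw [if_neg hxq, if_neg hxq]
  exact fun x n hx hinv => main (q + 1 - x) x n rfl hx hinv

theorem setFalse_getD (l : List Bool) (i y : Nat) (h : l.getD y false = false) :
    (l.set i false).getD y false = false := by
  by_cases hy : y = i
  · subst hy
    by_cases hlt : y < l.length
    · simp [List.getD_eq_getElem?_getD, List.getElem?_set_self hlt]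
    · rw [List.set_eq_of_length_le (by omega)]
      exact h
  · rw [List.getD_eq_getElem?_getD, List.getElem?_set_ne (Ne.symm hy), ← List.getD_eq_getElem?_getD]
    exact h

theorem markSieve_false (n st : Nat) (l : List Bool) (i y : Nat)
    (h : l.getD y false = false) : (markSieve n st l i).getD y false = false := by
  revert h
  fun_induction markSieve n st l i with
  | case1 l i hg ih =>
    intro h
    exact ih (setFalse_getD l i y h)
  | case2 l i hg =>
    intro h
    exact h

theorem sieveFold_false (n y : Nat) (ps : List Nat) (sv : List Bool)
    (h : sv.getD y false = false) :
    ((ps.foldl (fun sv p => if sv.getD p false then markSieve n p sv (p * p) else sv) sv).getD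
      y false) = false := by
  induction ps generalizing sv with
  | nil => exact h
  | cons p rest ih =>
    rw [List.foldl_cons]
    apply ih
    by_cases hp : sv.getD p false
    · rw [if_pos hp]
      exact markSieve_false n p sv (p * p) y h
    · rw [if_neg hp]
      exact h

theorem sieve_lt (n : Nat) : (sievePrimesUpto n).Pairwise (· < ·) := by
  unfold sievePrimesUpto
  by_cases hn : n < 2
  · rw [if_pos hn]
    exact List.Pairwise.nil
  · rw [if_neg hn]
    exact (List.pairwise_lt_range).filter _

theorem sieve_ge2 (n : Nat) : ∀ p ∈ sievePrimesUpto n, 2 ≤ p := by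
  intro p hp
  unfold sievePrimesUpto at hp
  by_cases hn : n < 2
  · rw [if_pos hn] at hp
    simp at hp
  · rw [if_neg hn] at hp
    simp only [List.mem_filter] at hp
    obtain ⟨_, hpt⟩ := hp
    have hlen : ((List.replicate (n + 1) true).set 0 false).length = n + 1 := by simp
    have h0 : (((List.replicate (n + 1) true).set 0 false).set 1 false).getD 0 false = false := by
      rw [List.getD_eq_getElem?_getD, List.getElem?_set_ne (by omega), ← List.getD_eq_getElem?_getD]
      simp [List.getD_eq_getElem?_getD]
    have h1 : (((List.replicate (n + 1) true).set 0 false).set 1 false).getD 1 false = false := by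
      simp [List.getD_eq_getElem?_getD, List.getElem?_set_self (by rw [hlen]; omega : (1:Nat) < ((List.replicate (n + 1) true).set 0 false).length)]
    rcases Nat.lt_or_ge p 2 with hp2 | hp2
    · interval_cases p
      · rw [sieveFold_false n 0 _ _ h0] at hpt
        simp at hpt
      · rw [sieveFold_false n 1 _ _ h1] at hpt
        simp at hpt
    · exact hp2

theorem MS_pos (q : Nat) (ps : List Nat) : ∀ (b0 b : Nat), 0 < b0 →
    (∀ p ∈ ps, 1 ≤ p) → MS q ps b0 b → 0 < b := by
  induction ps with
  | nil =>
    intro b0 b hb0 _ h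
    exact h ▸ hb0
  | cons p rest ih =>
    rintro b0 b hb0 hp ⟨k, _, hms⟩
    have hp1 : 1 ≤ p := hp p (List.mem_cons_self ..)
    exact ih _ b (Nat.mul_pos hb0 (pow_pos (Nat.mul_pos hp1 hp1) k))
      (fun r hr => hp r (List.mem_cons_of_mem _ hr)) hms

-- ===== VERDICT (by name: the statement is the Claim_ definition above) =====
theorem multipliers_prefix_spec : Claim_equal_multipliers_prefix := by
  intro qmax _
  unfold Spec_multipliers_prefix multipliers_prefix multipliers_prefix_alt
  by_cases hq : qmax ≤ 0
  · rw [if_pos hq, if_pos hq]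
  · rw [if_neg hq, if_neg hq]
    dsimp only
    have hq1 : 1 ≤ qmax.toNat := by omega
    generalize hPS : (sievePrimesUpto (Nat.sqrt qmax.toNat + 1)).filter
      (fun p => p % 5 == 2 || p % 5 == 3) = PS
    generalize hQ : qmax.toNat = q at hq1 hPS ⊢
    have hps2 : ∀ p ∈ PS, 2 ≤ p := by
      intro p hp
      rw [← hPS] at hp
      exact sieve_ge2 _ p (List.mem_filter.mp hp).1
    have hps1 : ∀ p ∈ PS, 1 ≤ p := fun p hp => by have := hps2 p hp; omega
    have hlt : PS.Pairwise (· < ·) := by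
      rw [← hPS]
      exact (sieve_lt _).filter _
    have hle : PS.Pairwise (· ≤ ·) := hlt.imp le_of_lt
    have hvals : ∀ nn, nn ∈ pow5 q 1 ++ forA q PS 1 ↔ VS q PS 1 nn :=
      fun nn => valsA_mem q PS 1 nn one_pos hps2 hle
    have hLlt : (PySem.List.sorted (PySem.Set.ofList (pow5 q 1 ++ forA q PS 1))
        (fun x => x) false).Pairwise (· < ·) := PySem.List.sorted_ofList_pairwise_lt _
    have hLmem : ∀ y, y ∈ PySem.List.sorted (PySem.Set.ofList (pow5 q 1 ++ forA q PS 1))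
        (fun x => x) false ↔ VS q PS 1 y := by
      intro y
      rw [PySem.List.mem_sorted, PySem.Set.mem_ofList]
      exact hvals y
    have hbases : ∀ b, b ∈ basesB q PS ↔ MS q PS 1 b := by
      intro b
      unfold basesB
      rw [basesB_mem q PS [1] b hps2 (by intro x hx; simp at hx; omega)]
      simp
    have hbpos : ∀ b ∈ basesB q PS, 0 < b :=
      fun b hb => MS_pos q PS 1 b one_pos hps1 ((hbases b).mp hb)
    have hrep0 : ∀ y : Nat, (List.replicate (q + 1) (0:Nat)).getD y 0 = 0 := by
      intro y
      rw [List.getD_eq_getElem?_getD, List.getElem?_replicate]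
      split <;> rfl
    have hfreq1 : ∀ y, ((basesB q PS).foldl (markB q) (List.replicate (q + 1) 0)).getD y 0 = 1 ↔
        VS q PS 1 y := by
      intro y
      rw [foldMark_getD q _ _ y hbpos (by simp)]
      rw [← MS_P5_iff_VS q PS 1 y one_pos hps1]
      simp only [hrep0]
      constructor
      · rintro (⟨b, hb, hP⟩ | h0)
        · exact ⟨b, (hbases b).mp hb, hP⟩
        · omega
      · rintro ⟨b, hb, hP⟩
        exact Or.inl ⟨b, (hbases b).mpr hb, hP⟩
    have hfreq01 : ∀ y, ((basesB q PS).foldl (markB q) (List.replicate (q + 1) 0)).getD y 0 = 0 ∨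
        ((basesB q PS).foldl (markB q) (List.replicate (q + 1) 0)).getD y 0 = 1 :=
      fun y => foldMark_01 q _ _ y (Or.inl (hrep0 y))
    have hmem : ∀ y, ((basesB q PS).foldl (markB q) (List.replicate (q + 1) 0)).getD y 0 =
        if y ∈ PySem.List.sorted (PySem.Set.ofList (pow5 q 1 ++ forA q PS 1))
          (fun x => x) false then 1 else 0 := by
      intro y
      by_cases hy : y ∈ PySem.List.sorted (PySem.Set.ofList (pow5 q 1 ++ forA q PS 1))
        (fun x => x) false
      · rw [if_pos hy]
        exact (hfreq1 y).mpr ((hLmem y).mp hy)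
      · rw [if_neg hy]
        rcases hfreq01 y with h0 | h1
        · exact h0
        · exact absurd ((hLmem y).mpr ((hfreq1 y).mp h1)) hy
    have hinv0 : ∀ j (h : j < (PySem.List.sorted (PySem.Set.ofList (pow5 q 1 ++ forA q PS 1))
        (fun x => x) false).length), (PySem.List.sorted (PySem.Set.ofList (pow5 q 1 ++ forA q PS 1))
        (fun x => x) false)[j] < 1 ↔ j < 0 := by
      intro j hj
      have hmem' := (hLmem _).mp (List.getElem_mem hj)
      obtain ⟨_, hpos, _⟩ := VS_facts q PS 1 _ hps1 one_pos hmem'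
      omega
    rw [walk q _ _ hLlt hmem 1 0 one_pos hinv0]
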